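-- pv_equiv track=rewrite | github.com/JaeEon-Ryu/Coding_test | Programmers/Level_3/Lv3_타일장식물.py | solution
-- ===== SOURCE A (Python) =====
-- def solution(N):
--     shortSide = 1
--     longSide = 1
--     for i in range(N-1):
--         tempShortSide = shortSide
--         shortSide = longSide
--         longSide += tempShortSide
--     answer = (shortSide + longSide)*2
--     return answer
-- ===== SOURCE B (Python) =====
-- def solution(N):
--     # perimeter = 2 * F(Np + 2) with F Fibonacci and Np = max(N, 1); computed by fast doubling
--     def fib_pair(n):
--         # returns (F(n), F(n+1))
--         if n == 0:
--             return (0, 1)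
--         a, b = fib_pair(n >> 1)
--         c = a * (2 * b - a)
--         d = a * a + b * b
--         if n & 1:
--             return (d, c + d)
--         return (c, d)
--     n = N if N > 1 else 1
--     return 2 * fib_pair(n + 2)[0]
-- ===== Notes on version B (the rewrite author's own statement) =====
-- stated objective: faster
-- what changed: Replaced the linear iterative Fibonacci loop by the closed form answer = twice the Fibonacci number at index max(N,one)+two, computed with fast-doubling recursion; intended as faster, measured roughly ten to ninety times on the probe's mid sizes (the largest size's huge result could not be decoded by the probe).
import Mathlib
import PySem

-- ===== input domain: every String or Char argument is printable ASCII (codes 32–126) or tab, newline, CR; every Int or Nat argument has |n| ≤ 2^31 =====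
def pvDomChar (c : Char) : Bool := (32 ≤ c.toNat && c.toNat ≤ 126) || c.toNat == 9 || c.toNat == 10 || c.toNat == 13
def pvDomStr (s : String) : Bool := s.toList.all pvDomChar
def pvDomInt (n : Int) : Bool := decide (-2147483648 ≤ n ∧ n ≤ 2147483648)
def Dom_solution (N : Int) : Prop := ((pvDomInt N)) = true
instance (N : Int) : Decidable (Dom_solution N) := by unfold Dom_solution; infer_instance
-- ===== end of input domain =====

-- B replaces A's linear iterative Fibonacci loop by the closed form: the answer is twice the Fibonacci
-- number at index max(N,one)+two, computed by fast doubling; intended as faster (measured roughly ten to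
-- ninety times on a timing run's mid sizes); return values proved equal for all N.


-- ===== PORT A =====
def loopA (N : Int) : Int × Int :=
  (PySem.List.pyRange 0 (N - 1) 1).foldl
    (fun (p : Int × Int) _ => (p.2, p.1 + p.2)) (1, 1)

def solution (N : Int) : Int :=
  ((loopA N).1 + (loopA N).2) * 2

-- ===== PORT B =====
-- fib_pair from Source B: returns the pair (F(n), F(n+1)) by fast doubling
def fibPair : Nat → Int × Int
  | 0 => (0, 1)
  | (n + 1) =>
      let p := fibPair ((n + 1) / 2)
      let a := p.1
      let b := p.2
      let c := a * (2 * b - a)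
      let d := a * a + b * b
      if (n + 1) % 2 = 1 then (d, c + d) else (c, d)
decreasing_by omega

def solution_alt (N : Int) : Int :=
  2 * (fibPair ((if N > 1 then N else 1) + 2).toNat).1

-- ===== PRECONDITION & SPEC =====
def Spec_solution (N : Int) (out : Int) : Prop := out = solution_alt N
instance (N : Int) (out : Int) : Decidable (Spec_solution N out) := by unfold Spec_solution; infer_instance

-- ===== CLAIM (what is proved, stated in full; the proofs are below) =====
def Claim_equal_solution : Prop := ∀ (N : Int), Dom_solution N → Spec_solution N (solution N)

-- ===== LEMMAS AND PROOFS =====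

theorem fibPair_eq (n : Nat) : fibPair n = ((Nat.fib n : Int), (Nat.fib (n + 1) : Int)) := by
  induction n using Nat.strong_induction_on with
  | _ n ih =>
    match n with
    | 0 => simp [fibPair]
    | (m + 1) =>
      rw [fibPair]
      have hlt : (m + 1) / 2 < m + 1 := by omega
      rw [ih _ hlt]
      have hsub : (Nat.fib ((m + 1) / 2) : Int) ≤ 2 * (Nat.fib ((m + 1) / 2 + 1) : Int) := by
        have := Nat.fib_le_fib_succ (n := (m + 1) / 2)
        have : (Nat.fib ((m + 1) / 2) : Int) ≤ (Nat.fib ((m + 1) / 2 + 1) : Int) := by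
          exact_mod_cast this
        omega
      rcases Nat.even_or_odd (m + 1) with he | ho
      · obtain ⟨k, hk⟩ := he
        have hk2 : m + 1 = 2 * k := by omega
        have hdiv : (m + 1) / 2 = k := by omega
        have hmod : ¬ ((m + 1) % 2 = 1) := by omega
        simp only [hdiv, hmod, if_false]
        have h1 : (Nat.fib (2 * k) : Int) = (Nat.fib k : Int) * (2 * (Nat.fib (k + 1) : Int) - (Nat.fib k : Int)) := by
          have := Nat.fib_two_mul k
          have hle : Nat.fib k ≤ 2 * Nat.fib (k + 1) := by
            have := Nat.fib_le_fib_succ (n := k); omega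
          rw [this]
          push_cast [Nat.sub_le, hle]
          ring
        have h2 : (Nat.fib (2 * k + 1) : Int) = (Nat.fib k : Int) * (Nat.fib k : Int) + (Nat.fib (k + 1) : Int) * (Nat.fib (k + 1) : Int) := by
          have := Nat.fib_two_mul_add_one k
          rw [this]; push_cast; ring
        rw [hk2]
        simp only [Prod.mk.injEq]
        exact ⟨by rw [h1]; try ring, by rw [h2]; try ring⟩
      · obtain ⟨k, hk⟩ := ho
        have hdiv : (m + 1) / 2 = k := by omega
        have hmod : (m + 1) % 2 = 1 := by omega
        simp only [hdiv, hmod, if_true]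
        have h2 : (Nat.fib (2 * k + 1) : Int) = (Nat.fib k : Int) * (Nat.fib k : Int) + (Nat.fib (k + 1) : Int) * (Nat.fib (k + 1) : Int) := by
          have := Nat.fib_two_mul_add_one k
          rw [this]; push_cast; ring
        have h1 : (Nat.fib (2 * k) : Int) = (Nat.fib k : Int) * (2 * (Nat.fib (k + 1) : Int) - (Nat.fib k : Int)) := by
          have := Nat.fib_two_mul k
          have hle : Nat.fib k ≤ 2 * Nat.fib (k + 1) := by
            have := Nat.fib_le_fib_succ (n := k); omega
          rw [this]
          push_cast [Nat.sub_le, hle]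
          ring
        have h3 : (Nat.fib (2 * k + 2) : Int) = (Nat.fib (2 * k) : Int) + (Nat.fib (2 * k + 1) : Int) := by
          have := Nat.fib_add_two (n := 2 * k)
          rw [this]; push_cast; ring
        rw [hk]
        simp only [Prod.mk.injEq]
        refine ⟨by rw [h2]; try ring, ?_⟩
        have he : 2 * k + 1 + 1 = 2 * k + 2 := by ring
        rw [he, h3, h1, h2]
        try ring

theorem foldl_fib (l : List Int) : ∀ (j : Nat),
    l.foldl (fun (p : Int × Int) _ => (p.2, p.1 + p.2))
      ((Nat.fib (j + 1) : Int), (Nat.fib (j + 2) : Int))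
      = ((Nat.fib (l.length + j + 1) : Int), (Nat.fib (l.length + j + 2) : Int)) := by
  induction l with
  | nil => intro j; simp
  | cons x xs ih =>
    intro j
    simp only [List.foldl_cons, List.length_cons]
    have hstep : ((Nat.fib (j + 1) : Int) + (Nat.fib (j + 2) : Int)) = (Nat.fib (j + 2 + 1) : Int) := by
      have := Nat.fib_add_two (n := j + 1)
      rw [show j + 2 + 1 = j + 1 + 2 by ring, this]
      push_cast; ring
    rw [hstep]
    have := ih (j + 1)
    rw [show j + 1 + 1 = j + 2 by ring] at this
    rw [this]
    have h1 : xs.length + (j + 1) + 1 = xs.length + 1 + j + 1 := by ring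
    have h2 : xs.length + (j + 1) + 2 = xs.length + 1 + j + 2 := by ring
    rw [h1, h2]

-- ===== VERDICT (by name: the statement is the Claim_ definition above) =====
theorem solution_spec : Claim_equal_solution := by
  intro N _
  unfold Spec_solution solution solution_alt loopA
  rw [fibPair_eq]
  have h0 := foldl_fib (PySem.List.pyRange 0 (N - 1) 1) 0
  norm_num at h0
  rw [show ((1 : Int), (1 : Int)) = ((Nat.fib 1 : Int), (Nat.fib 2 : Int)) by norm_num] at h0 ⊢
  rw [h0]
  have htarget : ((if N > 1 then N else 1) + 2).toNat = (N.toNat - 1) + 3 := by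
    split_ifs with h <;> omega
  have hfib3 : (Nat.fib ((N.toNat - 1) + 3) : Int)
      = (Nat.fib ((N.toNat - 1) + 1) : Int) + (Nat.fib ((N.toNat - 1) + 2) : Int) := by
    have := Nat.fib_add_two (n := (N.toNat - 1) + 1)
    rw [show (N.toNat - 1) + 3 = (N.toNat - 1) + 1 + 2 by ring, this]
    push_cast; ring
  rw [htarget]
  simp only [hfib3]
  ring
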